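-- pv_equiv track=rewrite | github.com/Opsimathy/IT5003 | Finals/CS2040C 25S2/CS2040C 25S2 Final Code [Original].py | maxTrinityStrength
-- ===== SOURCE A (Python) =====
-- from typing import List, Tuple, Optional, Set
--
-- def maxTrinityStrength(n: int, EL: List[Tuple[int, int]]) -> int:
--     AM = [[0] * (n + 1) for _ in range(n + 1)]
--     for u, v in EL:
--         AM[u][v] = AM[v][u] = 1
--     ans = -1
--     for i in range(1, n + 1):
--         for j in range(i + 1, n + 1):
--             for k in range(j + 1, n + 1):
--                 if AM[i][j] and AM[j][k] and AM[i][k]: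
--                     strength = 0
--                     for x in range(1, n + 1):
--                         if x in (i, j, k):
--                             continue
--                         if AM[i][x]:
--                             strength += 1
--                         if AM[j][x]:
--                             strength += 1
--                         if AM[k][x]:
--                             strength += 1
--                     ans = max(ans, strength)
--     return ans
-- ===== SOURCE B (Python) =====
-- from typing import List, Tuple
--
-- def maxTrinityStrength(n: int, EL: List[Tuple[int, int]]) -> int:
--     # Adjacency-list triangle enumeration: from the adjacency matrix derive each
--     # vertex's neighbour list and degree once, walk triangles i < j < k through
--     # neighbour lists (one O(1) matrix probe closes the triangle), and score each
--     # with the closed form deg[i] + deg[j] + deg[k] - 6.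
--     AM = [[0] * (n + 1) for _ in range(n + 1)]
--     for u, v in EL:
--         AM[u][v] = AM[v][u] = 1
--     nbr = [[x for x in range(1, n + 1) if AM[v][x] and x != v] for v in range(n + 1)]
--     deg = [len(nb) for nb in nbr]
--     ans = -1
--     for i in range(1, n + 1):
--         for j in nbr[i]:
--             if i < j:
--                 for k in nbr[j]:
--                     if j < k and AM[i][k]:
--                         ans = max(ans, deg[i] + deg[j] + deg[k] - 6)
--     return ans
-- ===== Notes on version B (the rewrite author's own statement) =====
-- stated objective: faster
-- what changed: Replaces the O(n^3) vertex-triple scan with an inner O(n) strength loop by a neighbour-list traversal: neighbour lists and a degree table are derived from the adjacency matrix once, triangles i<j<k are walked through neighbour lists with a single O(1) matrix probe closing each one, and scored with the closed form deg[i]+deg[j]+deg[k]-6.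
import Mathlib
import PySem

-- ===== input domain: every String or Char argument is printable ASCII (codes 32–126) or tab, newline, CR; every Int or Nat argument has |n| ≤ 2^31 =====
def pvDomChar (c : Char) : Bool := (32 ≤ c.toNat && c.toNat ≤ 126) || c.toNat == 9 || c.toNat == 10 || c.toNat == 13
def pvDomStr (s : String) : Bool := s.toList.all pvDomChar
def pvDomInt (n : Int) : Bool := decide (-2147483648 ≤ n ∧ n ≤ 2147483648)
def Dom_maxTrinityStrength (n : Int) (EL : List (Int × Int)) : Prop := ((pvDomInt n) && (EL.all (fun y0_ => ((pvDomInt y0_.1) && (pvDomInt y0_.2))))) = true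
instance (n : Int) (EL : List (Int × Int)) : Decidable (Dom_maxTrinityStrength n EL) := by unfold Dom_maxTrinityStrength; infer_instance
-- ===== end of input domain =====

-- B derives neighbour lists and a degree table from the adjacency matrix once and
-- walks triangles through neighbour lists with the closed-form score
-- deg[i]+deg[j]+deg[k]-6, instead of A's scan over all vertex triples with an
-- inner strength-counting loop.

-- ===== PORT A =====
-- AM[i][j] read/write with Python list-index semantics (total forms; exact under Pre_,
-- whose indices are always in range).
def pvGetAM (AM : List (List Int)) (i j : Int) : Int :=
  PySem.List.pyGetD (PySem.List.pyGetD AM i []) j 0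

def pvSetAM (AM : List (List Int)) (i j : Int) (v : Int) : List (List Int) :=
  PySem.List.pySetD AM i (PySem.List.pySetD (PySem.List.pyGetD AM i []) j v)

def pvBuildAM (n : Int) (EL : List (Int × Int)) : List (List Int) :=
  EL.foldl (fun AM uv => pvSetAM (pvSetAM AM uv.1 uv.2 1) uv.2 uv.1 1)
    ((PySem.List.pyRange 0 (n + 1) 1).map (fun _ => List.replicate (n + 1).toNat 0))

def maxTrinityStrength (n : Int) (EL : List (Int × Int)) : Int :=
  let AM := pvBuildAM n EL
  (PySem.List.pyRange 1 (n + 1) 1).foldl (fun ans i =>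
    (PySem.List.pyRange (i + 1) (n + 1) 1).foldl (fun ans j =>
      (PySem.List.pyRange (j + 1) (n + 1) 1).foldl (fun ans k =>
        if pvGetAM AM i j ≠ 0 ∧ pvGetAM AM j k ≠ 0 ∧ pvGetAM AM i k ≠ 0 then
          let strength :=
            (PySem.List.pyRange 1 (n + 1) 1).foldl (fun s x =>
              if x = i ∨ x = j ∨ x = k then s
              else
                let s := if pvGetAM AM i x ≠ 0 then s + 1 else s
                let s := if pvGetAM AM j x ≠ 0 then s + 1 else s
                if pvGetAM AM k x ≠ 0 then s + 1 else s) 0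
          max ans strength
        else ans) ans) ans) (-1)

-- ===== PORT B =====
-- Source B builds the same adjacency matrix (same two statements), then
-- nbr = [[x for x in range(1, n+1) if AM[v][x] and x != v] for v in range(n+1)]
-- and deg = [len(nb) for nb in nbr]; nbr[i] / deg[i] reads use the total pyGetD form
-- (exact under Pre_, whose indices are in range).
def pvNbr (n : Int) (AM : List (List Int)) : List (List Int) :=
  (PySem.List.pyRange 0 (n + 1) 1).map (fun v =>
    (PySem.List.pyRange 1 (n + 1) 1).filter (fun x => decide (pvGetAM AM v x ≠ 0 ∧ x ≠ v)))

def maxTrinityStrength_alt (n : Int) (EL : List (Int × Int)) : Int :=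
  let AM := pvBuildAM n EL
  let nbr := pvNbr n AM
  let deg := nbr.map (fun nb => (nb.length : Int))
  (PySem.List.pyRange 1 (n + 1) 1).foldl (fun ans i =>
    (PySem.List.pyGetD nbr i []).foldl (fun ans j =>
      if i < j then
        (PySem.List.pyGetD nbr j []).foldl (fun ans k =>
          if j < k ∧ pvGetAM AM i k ≠ 0 then
            max ans (PySem.List.pyGetD deg i 0 + PySem.List.pyGetD deg j 0 +
              PySem.List.pyGetD deg k 0 - 6)
          else ans) ans
      else ans) ans) (-1)

-- ===== PRECONDITION & SPEC =====
-- Pre_ is exactly A's returning domain: every edge endpoint is a valid Python index into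
-- the rows 0..n of the (n+1)x(n+1) matrix, i.e. lies in [-(n+1), n]; outside it A raises
-- IndexError.
def Pre_maxTrinityStrength (n : Int) (EL : List (Int × Int)) : Prop :=
  ∀ uv ∈ EL, -(n + 1) ≤ uv.1 ∧ uv.1 ≤ n ∧ -(n + 1) ≤ uv.2 ∧ uv.2 ≤ n
instance (n : Int) (EL : List (Int × Int)) : Decidable (Pre_maxTrinityStrength n EL) := by
  unfold Pre_maxTrinityStrength; infer_instance
def pvWitness_maxTrinityStrength : Int × (List (Int × Int)) := (4, [(1, 2), (2, 3), (1, 3), (3, 4)])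

def Spec_maxTrinityStrength (n : Int) (EL : List (Int × Int)) (out : Int) : Prop := out = maxTrinityStrength_alt n EL
instance (n : Int) (EL : List (Int × Int)) (out : Int) : Decidable (Spec_maxTrinityStrength n EL out) := by unfold Spec_maxTrinityStrength; infer_instance

-- ===== CLAIM (what is proved, stated in full; the proofs are below) =====
def Claim_equal_maxTrinityStrength : Prop := ∀ (n : Int) (EL : List (Int × Int)), Dom_maxTrinityStrength n EL → Pre_maxTrinityStrength n EL → Spec_maxTrinityStrength n EL (maxTrinityStrength n EL)

-- ===== LEMMAS AND PROOFS =====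

-- symmetric multi-edge membership: "there is an edge between a and b in EL"
def pvRangeN (n : Int) : List Int := PySem.List.pyRange 1 (n + 1) 1

def pvDA (n : Int) (EL : List (Int × Int)) (v : Int) : Int :=
  (((pvRangeN n).filter (fun x => decide (v ≠ x ∧ ((v, x) ∈ EL ∨ (x, v) ∈ EL)))).length : Int)

def pvScore (n : Int) (EL : List (Int × Int)) (i j k : Int) : Int :=
  pvDA n EL i + pvDA n EL j + pvDA n EL k - 6

def pvTri (n : Int) (EL : List (Int × Int)) (i j k : Int) : Prop :=
  1 ≤ i ∧ i < j ∧ j < k ∧ k ≤ n ∧ (i ≠ j ∧ ((i, j) ∈ EL ∨ (j, i) ∈ EL)) ∧ (j ≠ k ∧ ((j, k) ∈ EL ∨ (k, j) ∈ EL)) ∧ (i ≠ k ∧ ((i, k) ∈ EL ∨ (k, i) ∈ EL))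

-- full characterisation of the answer both programs compute
def pvIsAns (n : Int) (EL : List (Int × Int)) (r : Int) : Prop :=
  -1 ≤ r ∧ (r = -1 ∨ ∃ i j k, pvTri n EL i j k ∧ r = pvScore n EL i j k) ∧
    ∀ i j k, pvTri n EL i j k → pvScore n EL i j k ≤ r

theorem pvIsAns_unique {n : Int} {EL : List (Int × Int)} {r s : Int}
    (h1 : pvIsAns n EL r) (h2 : pvIsAns n EL s) : r = s := by
  obtain ⟨hr1, hr2, hr3⟩ := h1
  obtain ⟨hs1, hs2, hs3⟩ := h2
  have hrs : r ≤ s := by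
    rcases hr2 with h | ⟨i, j, k, hT, hv⟩
    · omega
    · have := hs3 i j k hT; omega
  have hsr : s ≤ r := by
    rcases hs2 with h | ⟨i, j, k, hT, hv⟩
    · omega
    · have := hr3 i j k hT; omega
  omega

-- ---- generic conditional-max fold ----

theorem cmax_init_le {α : Type} (l : List α) (p : α → Prop) [DecidablePred p]
    (f : α → Int) (a : Int) :
    a ≤ l.foldl (fun ans t => if p t then max ans (f t) else ans) a := by
  induction l generalizing a with
  | nil => simp
  | cons x xs ih =>
    refine le_trans ?_ (ih (if p x then max a (f x) else a))
    split_ifs <;> simp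

theorem cmax_ge {α : Type} (l : List α) (p : α → Prop) [DecidablePred p]
    (f : α → Int) (a : Int) {t : α} (ht : t ∈ l) (hp : p t) :
    f t ≤ l.foldl (fun ans t => if p t then max ans (f t) else ans) a := by
  induction l generalizing a with
  | nil => cases ht
  | cons x xs ih =>
    rcases List.mem_cons.mp ht with rfl | hmem
    · refine le_trans ?_ (cmax_init_le xs p f _)
      simp [hp]
    · exact ih _ hmem

theorem cmax_cases {α : Type} (l : List α) (p : α → Prop) [DecidablePred p]
    (f : α → Int) (a : Int) :
    l.foldl (fun ans t => if p t then max ans (f t) else ans) a = a ∨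
      ∃ t ∈ l, p t ∧ l.foldl (fun ans t => if p t then max ans (f t) else ans) a = f t := by
  induction l generalizing a with
  | nil => left; rfl
  | cons x xs ih =>
    simp only [List.foldl_cons]
    rcases ih (if p x then max a (f x) else a) with h | ⟨t, hm, hp, hv⟩
    · by_cases hpx : p x
      · rw [h]; simp only [hpx, if_true]
        rcases max_choice a (f x) with hmx | hmx
        · left; exact hmx
        · right; exact ⟨x, List.mem_cons_self, hpx, hmx⟩
      · left; rw [h]; simp [hpx]
    · right; exact ⟨t, List.mem_cons_of_mem _ hm, hp, hv⟩

-- the one lemma both sides feed: a conditional-max fold whose admitted candidates are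
-- exactly the triangles with their scores characterises the answer
theorem isAns_of {n : Int} {EL : List (Int × Int)} (L : List (Int × Int × Int))
    (p : Int × Int × Int → Prop) [DecidablePred p] (f : Int × Int × Int → Int)
    (hsound : ∀ t ∈ L, p t → pvTri n EL t.1 t.2.1 t.2.2 ∧ f t = pvScore n EL t.1 t.2.1 t.2.2)
    (hcomp : ∀ i j k, pvTri n EL i j k → ∃ t ∈ L, p t ∧ f t = pvScore n EL i j k) :
    pvIsAns n EL (L.foldl (fun ans t => if p t then max ans (f t) else ans) (-1)) := by
  refine ⟨cmax_init_le L p f (-1), ?_, ?_⟩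
  · rcases cmax_cases L p f (-1) with h | ⟨t, hm, hp, hv⟩
    · left; exact h
    · right
      obtain ⟨hT, hf⟩ := hsound t hm hp
      exact ⟨t.1, t.2.1, t.2.2, hT, by rw [hv, hf]⟩
  · intro i j k hT
    obtain ⟨t, hm, hp, hf⟩ := hcomp i j k hT
    calc pvScore n EL i j k = f t := hf.symm
      _ ≤ _ := cmax_ge L p f (-1) hm hp

theorem foldl_flatMap' {α β γ : Type} (l : List α) (g : α → List β) (f : γ → β → γ) (a : γ) :
    (l.flatMap g).foldl f a = l.foldl (fun a x => (g x).foldl f a) a :=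
  List.foldl_flatMap

-- ---- normalized edge lists and their consequences ----

-- label reduction: Python's negative list index u resolves to u + (n+1)
def pvNrm (n u : Int) : Int := if u < 0 then u + (n + 1) else u

def pvNEL (n : Int) (EL : List (Int × Int)) : List (Int × Int) :=
  EL.map (fun uv => (pvNrm n uv.1, pvNrm n uv.2))

def pvInR (n : Int) (EL : List (Int × Int)) : Prop :=
  ∀ uv ∈ EL, 0 ≤ uv.1 ∧ uv.1 ≤ n ∧ 0 ≤ uv.2 ∧ uv.2 ≤ n

theorem pvNrm_range {n u : Int} (hu : -(n + 1) ≤ u ∧ u ≤ n) :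
    0 ≤ pvNrm n u ∧ pvNrm n u ≤ n := by
  unfold pvNrm; split_ifs <;> omega

theorem pvInR_NEL {n : Int} {EL : List (Int × Int)} (hPre : Pre_maxTrinityStrength n EL) :
    pvInR n (pvNEL n EL) := by
  intro uv h
  simp only [pvNEL, List.mem_map] at h
  obtain ⟨e, he, rfl⟩ := h
  have hb := hPre e he
  have h1 := pvNrm_range (n := n) (u := e.1) ⟨hb.1, hb.2.1⟩
  have h2 := pvNrm_range (n := n) (u := e.2) ⟨hb.2.2.1, hb.2.2.2⟩
  exact ⟨h1.1, h1.2, h2.1, h2.2⟩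

-- ---- A side: the matrix ----

def pvAMshape (n : Int) (AM : List (List Int)) : Prop :=
  AM.length = (n + 1).toNat ∧ ∀ r ∈ AM, r.length = (n + 1).toNat

theorem shape0 (n : Int) :
    pvAMshape n ((PySem.List.pyRange 0 (n + 1) 1).map (fun _ => List.replicate (n + 1).toNat 0)) := by
  constructor
  · simp [PySem.List.length_pyRange_one]
  · intro r hr
    simp only [List.mem_map] at hr
    obtain ⟨_, _, rfl⟩ := hr
    simp

theorem pyGetD_replicate_zero (m : Nat) (i : Int) :
    PySem.List.pyGetD (List.replicate m (0:Int)) i 0 = 0 := by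
  unfold PySem.List.pyGetD PySem.List.pyGet?
  rcases h : PySem.List.pyIdx? (List.replicate m (0:Int)).length i with _ | j
  · simp
  · simp

theorem getAM_zero {n : Int} {a b : Int} (ha : 0 ≤ a ∧ a ≤ n) :
    pvGetAM ((PySem.List.pyRange 0 (n + 1) 1).map (fun _ => List.replicate (n + 1).toNat 0)) a b = 0 := by
  unfold pvGetAM
  rw [PySem.List.pyGetD_map_pyRange_of_nonneg _ _ _ _ ha.1 (by omega)]
  exact pyGetD_replicate_zero _ _

theorem pyGetD_pySetD_int {α : Type} (xs : List α) {i j : Int} (v d : α)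
    (hi : 0 ≤ i) (hilen : i < (xs.length : Int)) (hj : 0 ≤ j) :
    PySem.List.pyGetD (PySem.List.pySetD xs i v) j d = if j = i then v else PySem.List.pyGetD xs j d := by
  have h1 : i = ((i.toNat : ℕ) : ℤ) := (Int.toNat_of_nonneg hi).symm
  have h2 : j = ((j.toNat : ℕ) : ℤ) := (Int.toNat_of_nonneg hj).symm
  rw [h1, h2, PySem.List.pyGetD_pySetD_natCast _ _ _ _ _ (by omega)]
  split_ifs <;> first | rfl | omega

theorem row_mem {n : Int} {AM : List (List Int)} (h : pvAMshape n AM)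
    {u : Int} (hu : 0 ≤ u ∧ u ≤ n) : PySem.List.pyGetD AM u [] ∈ AM := by
  have hulen : u.toNat < AM.length := by rw [h.1]; omega
  rw [PySem.List.pyGetD_of_nonneg _ _ hu.1, List.getD_eq_getElem _ _ hulen]
  exact List.getElem_mem _

theorem shape_set {n : Int} {AM : List (List Int)} (h : pvAMshape n AM)
    {u : Int} (hu : 0 ≤ u ∧ u ≤ n) (v w : Int) : pvAMshape n (pvSetAM AM u v w) := by
  refine ⟨by simp [pvSetAM, PySem.List.length_pySetD, h.1], ?_⟩
  intro r hr
  rw [pvSetAM, PySem.List.pySetD_of_nonneg _ _ hu.1] at hr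
  rcases List.mem_or_eq_of_mem_set hr with hmem | rfl
  · exact h.2 _ hmem
  · rw [PySem.List.length_pySetD]
    exact h.2 _ (row_mem h hu)

theorem getAM_set {n : Int} {AM : List (List Int)} (h : pvAMshape n AM)
    {u v : Int} (hu : 0 ≤ u ∧ u ≤ n) (hv : 0 ≤ v ∧ v ≤ n) {a b : Int}
    (ha : 0 ≤ a ∧ a ≤ n) (hb : 0 ≤ b ∧ b ≤ n) (w : Int) :
    pvGetAM (pvSetAM AM u v w) a b = if a = u ∧ b = v then w else pvGetAM AM a b := by
  have hlen : (u : Int) < (AM.length : Int) := by rw [h.1]; omega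
  have hrlen : (PySem.List.pyGetD AM u []).length = (n + 1).toNat := h.2 _ (row_mem h hu)
  unfold pvGetAM pvSetAM
  rw [pyGetD_pySetD_int AM _ _ hu.1 hlen ha.1]
  by_cases hau : a = u
  · subst hau
    rw [if_pos rfl, pyGetD_pySetD_int _ _ _ hv.1 (by rw [hrlen]; omega) hb.1]
    by_cases hbv : b = v
    · rw [if_pos hbv, if_pos ⟨rfl, hbv⟩]
    · rw [if_neg hbv, if_neg (by tauto)]
  · rw [if_neg hau, if_neg (by tauto)]

theorem getAM_build_aux {n : Int} (EL : List (Int × Int)) :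
    ∀ (AM : List (List Int)), pvAMshape n AM → pvInR n EL →
    ∀ {a b : Int}, 1 ≤ a → a ≤ n → 1 ≤ b → b ≤ n →
    pvGetAM (EL.foldl (fun AM uv => pvSetAM (pvSetAM AM uv.1 uv.2 1) uv.2 uv.1 1) AM) a b
      = if ((a, b) ∈ EL ∨ (b, a) ∈ EL) then 1 else pvGetAM AM a b := by
  induction EL with
  | nil => intro AM h _ a b _ _ _ _; simp
  | cons e tl ih =>
    intro AM hsh hPre a b ha1 ha2 hb1 hb2
    have he := hPre e List.mem_cons_self
    have hPre' : pvInR n tl := fun uv h => hPre uv (List.mem_cons_of_mem _ h)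
    simp only [List.foldl_cons]
    rw [ih _ (shape_set (shape_set hsh ⟨he.1, he.2.1⟩ _ _) ⟨he.2.2.1, he.2.2.2⟩ _ _) hPre' ha1 ha2 hb1 hb2]
    rw [getAM_set (shape_set hsh ⟨he.1, he.2.1⟩ _ _) ⟨he.2.2.1, he.2.2.2⟩ ⟨he.1, he.2.1⟩ ⟨by omega, ha2⟩ ⟨by omega, hb2⟩ 1]
    rw [getAM_set hsh ⟨he.1, he.2.1⟩ ⟨he.2.2.1, he.2.2.2⟩ ⟨by omega, ha2⟩ ⟨by omega, hb2⟩ 1]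
    have hm : ((a, b) ∈ e :: tl ∨ (b, a) ∈ e :: tl) ↔ ((a = e.1 ∧ b = e.2) ∨ (a = e.2 ∧ b = e.1) ∨ ((a, b) ∈ tl ∨ (b, a) ∈ tl)) := by
      simp only [List.mem_cons, Prod.ext_iff]; tauto
    by_cases h1 : (a, b) ∈ tl ∨ (b, a) ∈ tl
    · rw [if_pos h1, if_pos (hm.mpr (Or.inr (Or.inr h1)))]
    · rw [if_neg h1]
      by_cases h2 : a = e.2 ∧ b = e.1
      · rw [if_pos h2, if_pos (hm.mpr (Or.inr (Or.inl h2)))]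
      · rw [if_neg h2]
        by_cases h3 : a = e.1 ∧ b = e.2
        · rw [if_pos h3, if_pos (hm.mpr (Or.inl h3))]
        · rw [if_neg h3, if_neg (fun hc => by rcases hm.mp hc with h | h | h <;> tauto)]

theorem getAM_build {n : Int} {EL : List (Int × Int)} (hIn : pvInR n EL)
    {a b : Int} (ha : 1 ≤ a ∧ a ≤ n) (hb : 1 ≤ b ∧ b ≤ n) :
    pvGetAM (pvBuildAM n EL) a b = if ((a, b) ∈ EL ∨ (b, a) ∈ EL) then 1 else 0 := by
  unfold pvBuildAM
  rw [getAM_build_aux EL _ (shape0 n) hIn ha.1 ha.2 hb.1 hb.2]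
  rw [getAM_zero (n := n) ⟨by omega, by omega⟩]

-- ---- index normalization: Python's negative list index ----

theorem pyIdx_neg (n : Nat) (i : Int) (h1 : -(n : Int) ≤ i) (h2 : i < 0) :
    PySem.List.pyIdx? n i = PySem.List.pyIdx? n (i + n) := by
  unfold PySem.List.pyIdx?
  split_ifs <;> first | (congr 1; omega) | omega

theorem pyGetD_neg {α : Type} (xs : List α) (i : Int) (d : α)
    (h1 : -(xs.length : Int) ≤ i) (h2 : i < 0) :
    PySem.List.pyGetD xs i d = PySem.List.pyGetD xs (i + xs.length) d := by
  unfold PySem.List.pyGetD PySem.List.pyGet?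
  rw [pyIdx_neg _ _ h1 h2]

theorem pySetD_neg {α : Type} (xs : List α) (i : Int) (v : α)
    (h1 : -(xs.length : Int) ≤ i) (h2 : i < 0) :
    PySem.List.pySetD xs i v = PySem.List.pySetD xs (i + xs.length) v := by
  unfold PySem.List.pySetD PySem.List.pySet?
  rw [pyIdx_neg _ _ h1 h2]

theorem pySetD_nrm {α : Type} (xs : List α) (u : Int) (v : α) {n : Int}
    (hlen : (xs.length : Int) = n + 1) (hu : -(n + 1) ≤ u ∧ u ≤ n) :
    PySem.List.pySetD xs u v = PySem.List.pySetD xs (pvNrm n u) v := by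
  unfold pvNrm
  split_ifs with h
  · rw [pySetD_neg xs u v (by omega) h, hlen]
  · rfl

theorem pyGetD_nrm {α : Type} (xs : List α) (u : Int) (d : α) {n : Int}
    (hlen : (xs.length : Int) = n + 1) (hu : -(n + 1) ≤ u ∧ u ≤ n) :
    PySem.List.pyGetD xs u d = PySem.List.pyGetD xs (pvNrm n u) d := by
  unfold pvNrm
  split_ifs with h
  · rw [pyGetD_neg xs u d (by omega) h, hlen]
  · rfl

theorem pvSetAM_nrm {n : Int} {AM : List (List Int)} (hsh : pvAMshape n AM)
    {u v : Int} (hu : -(n + 1) ≤ u ∧ u ≤ n) (hv : -(n + 1) ≤ v ∧ v ≤ n) (w : Int) :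
    pvSetAM AM u v w = pvSetAM AM (pvNrm n u) (pvNrm n v) w := by
  have hn : 0 ≤ n := by omega
  have hlen : (AM.length : Int) = n + 1 := by rw [hsh.1]; omega
  unfold pvSetAM
  rw [pyGetD_nrm AM u [] hlen hu]
  have hrow : PySem.List.pyGetD AM (pvNrm n u) [] ∈ AM := row_mem hsh (pvNrm_range hu)
  have hrlen : ((PySem.List.pyGetD AM (pvNrm n u) []).length : Int) = n + 1 := by
    rw [hsh.2 _ hrow]; omega
  rw [pySetD_nrm _ v _ hrlen hv, pySetD_nrm AM u _ hlen hu]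

theorem buildAM_cong {n : Int} : ∀ (EL : List (Int × Int)) (AM : List (List Int)),
    pvAMshape n AM → Pre_maxTrinityStrength n EL →
    EL.foldl (fun AM uv => pvSetAM (pvSetAM AM uv.1 uv.2 1) uv.2 uv.1 1) AM
      = (pvNEL n EL).foldl (fun AM uv => pvSetAM (pvSetAM AM uv.1 uv.2 1) uv.2 uv.1 1) AM := by
  intro EL
  induction EL with
  | nil => intro AM _ _; rfl
  | cons e tl ih =>
    intro AM hsh hPre
    have he := hPre e List.mem_cons_self
    have hu : -(n + 1) ≤ e.1 ∧ e.1 ≤ n := ⟨he.1, he.2.1⟩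
    have hv : -(n + 1) ≤ e.2 ∧ e.2 ≤ n := ⟨he.2.2.1, he.2.2.2⟩
    simp only [pvNEL, List.map_cons, List.foldl_cons]
    have hsh1 : pvAMshape n (pvSetAM AM (pvNrm n e.1) (pvNrm n e.2) 1) :=
      shape_set hsh (pvNrm_range hu) _ _
    have hstep : pvSetAM (pvSetAM AM e.1 e.2 1) e.2 e.1 1
        = pvSetAM (pvSetAM AM (pvNrm n e.1) (pvNrm n e.2) 1) (pvNrm n e.2) (pvNrm n e.1) 1 := by
      rw [pvSetAM_nrm hsh hu hv 1, pvSetAM_nrm hsh1 hv hu 1]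
    rw [hstep]
    have := ih (pvSetAM (pvSetAM AM (pvNrm n e.1) (pvNrm n e.2) 1) (pvNrm n e.2) (pvNrm n e.1) 1)
      (shape_set hsh1 (pvNrm_range hv) _ _) (fun uv h => hPre uv (List.mem_cons_of_mem _ h))
    simpa [pvNEL] using this

theorem buildAM_norm {n : Int} {EL : List (Int × Int)} (hPre : Pre_maxTrinityStrength n EL) :
    pvBuildAM n EL = pvBuildAM n (pvNEL n EL) := by
  unfold pvBuildAM
  exact buildAM_cong EL _ (shape0 n) hPre

-- ---- A side: flattened loop and strength ----

def pvTriplesA (n : Int) : List (Int × Int × Int) :=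
  (PySem.List.pyRange 1 (n + 1) 1).flatMap (fun i =>
    (PySem.List.pyRange (i + 1) (n + 1) 1).flatMap (fun j =>
      (PySem.List.pyRange (j + 1) (n + 1) 1).map (fun k => (i, j, k))))

def pvStrA (n : Int) (AM : List (List Int)) (t : Int × Int × Int) : Int :=
  (PySem.List.pyRange 1 (n + 1) 1).foldl (fun s x =>
    if x = t.1 ∨ x = t.2.1 ∨ x = t.2.2 then s
    else
      let s := if pvGetAM AM t.1 x ≠ 0 then s + 1 else s
      let s := if pvGetAM AM t.2.1 x ≠ 0 then s + 1 else s
      if pvGetAM AM t.2.2 x ≠ 0 then s + 1 else s) 0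

theorem mem_triplesA {n : Int} {t : Int × Int × Int} :
    t ∈ pvTriplesA n ↔ 1 ≤ t.1 ∧ t.1 < t.2.1 ∧ t.2.1 < t.2.2 ∧ t.2.2 ≤ n := by
  obtain ⟨i, j, k⟩ := t
  simp only [pvTriplesA, List.mem_flatMap, List.mem_map, PySem.List.mem_pyRange_one]
  constructor
  · rintro ⟨i', ⟨hi1, hi2⟩, j', ⟨hj1, hj2⟩, k', ⟨hk1, hk2⟩, h⟩
    simp only [Prod.mk.injEq] at h
    obtain ⟨rfl, rfl, rfl⟩ := h
    refine ⟨by omega, by omega, by omega, by omega⟩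
  · rintro ⟨h1, h2, h3, h4⟩
    exact ⟨i, ⟨by omega, by omega⟩, j, ⟨by omega, by omega⟩, k, ⟨by omega, by omega⟩, rfl⟩

theorem A_eq_fold (n : Int) (EL : List (Int × Int)) :
    maxTrinityStrength n EL =
      (pvTriplesA n).foldl (fun ans t =>
        if (pvGetAM (pvBuildAM n EL) t.1 t.2.1 ≠ 0 ∧ pvGetAM (pvBuildAM n EL) t.2.1 t.2.2 ≠ 0 ∧ pvGetAM (pvBuildAM n EL) t.1 t.2.2 ≠ 0) then max ans (pvStrA n (pvBuildAM n EL) t) else ans) (-1) := by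
  unfold maxTrinityStrength
  simp only [pvTriplesA, foldl_flatMap', List.foldl_map, pvStrA]

theorem countP_disj {α : Type} (l : List α) (p q : α → Bool)
    (h : ∀ x ∈ l, ¬(p x = true ∧ q x = true)) :
    l.countP (fun x => p x || q x) = l.countP p + l.countP q := by
  induction l with
  | nil => simp
  | cons x xs ih =>
    have hx := h x List.mem_cons_self
    have ih' := ih (fun y hy => h y (List.mem_cons_of_mem _ hy))
    by_cases hp : p x = true
    all_goals by_cases hq : q x = true
    · exact absurd ⟨hp, hq⟩ hx
    all_goals (simp only [List.countP_cons, ih', hp, hq]; simp; try omega)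

-- each vertex of a triangle contributes (its degree - 2) to the strength sum
theorem sum_cV {n : Int} {EL : List (Int × Int)} {i j k v d e : Int}
    (hd : ((v, d) ∈ EL ∨ (d, v) ∈ EL)) (he : ((v, e) ∈ EL ∨ (e, v) ∈ EL))
    (hde : d ≠ e) (hvd : v ≠ d) (hve : v ≠ e)
    (hmd : d ∈ pvRangeN n) (hme : e ∈ pvRangeN n)
    (hskip : ∀ x : Int, (x = i ∨ x = j ∨ x = k) ↔ (x = v ∨ x = d ∨ x = e)) :
    ((pvRangeN n).map (fun x =>
        if x = i ∨ x = j ∨ x = k then 0 else if ((v, x) ∈ EL ∨ (x, v) ∈ EL) then (1 : Int) else 0)).sum =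
      pvDA n EL v - 2 := by
  have hfun : ∀ x ∈ pvRangeN n,
      (if x = i ∨ x = j ∨ x = k then (0 : Int) else if ((v, x) ∈ EL ∨ (x, v) ∈ EL) then 1 else 0)
        = if (!(decide (x = i ∨ x = j ∨ x = k)) && decide ((v, x) ∈ EL ∨ (x, v) ∈ EL)) = true then 1 else 0 := by
    intro x _
    by_cases h1 : x = i ∨ x = j ∨ x = k <;> by_cases h2 : ((v, x) ∈ EL ∨ (x, v) ∈ EL) <;> simp [h1, h2]
  rw [List.map_congr_left hfun, PySem.List.sum_map_ite_one_zero]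
  have hnodup : (pvRangeN n).Nodup := PySem.List.nodup_pyRange_one 1 (n + 1)
  have hsplit : ∀ x ∈ pvRangeN n, (decide (v ≠ x ∧ ((v, x) ∈ EL ∨ (x, v) ∈ EL))) =
      ((!(decide (x = i ∨ x = j ∨ x = k)) && decide ((v, x) ∈ EL ∨ (x, v) ∈ EL)) || ((x == d) || (x == e))) := by
    intro x _
    by_cases hxd : x = d
    · subst hxd; simp [hd, hvd, (hskip x).mpr (Or.inr (Or.inl rfl))]
    · by_cases hxe : x = e
      · subst hxe; simp [he, hve, (hskip x).mpr (Or.inr (Or.inr rfl))]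
      · have hsk : (x = i ∨ x = j ∨ x = k) ↔ x = v := by
          rw [hskip x]; constructor
          · rintro (h | h | h) <;> first | exact h | exact absurd h hxd | exact absurd h hxe
          · exact fun h => Or.inl h
        by_cases hxv : x = v
        · subst hxv; simp [hsk, hxd, hxe]
        · have : v ≠ x := fun h => hxv h.symm
          simp [hsk, hxd, hxe, hxv, this]
  have hda : pvDA n EL v = ((pvRangeN n).countP (fun x => decide (v ≠ x ∧ ((v, x) ∈ EL ∨ (x, v) ∈ EL))) : Int) := by
    unfold pvDA; rw [List.countP_eq_length_filter]
  have hcd : (pvRangeN n).countP (fun x => x == d) = 1 := List.count_eq_one_of_mem hnodup hmd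
  have hce : (pvRangeN n).countP (fun x => x == e) = 1 := List.count_eq_one_of_mem hnodup hme
  have hdisj1 : (pvRangeN n).countP
      (fun x => ((!(decide (x = i ∨ x = j ∨ x = k)) && decide ((v, x) ∈ EL ∨ (x, v) ∈ EL)) || ((x == d) || (x == e))))
      = (pvRangeN n).countP (fun x => (!(decide (x = i ∨ x = j ∨ x = k)) && decide ((v, x) ∈ EL ∨ (x, v) ∈ EL)))
        + (pvRangeN n).countP (fun x => ((x == d) || (x == e))) := by
    apply countP_disj
    intro x _ ⟨h1, h2⟩
    simp only [Bool.and_eq_true, Bool.not_eq_true', decide_eq_false_iff_not, decide_eq_true_eq] at h1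
    simp only [Bool.or_eq_true, beq_iff_eq] at h2
    exact h1.1 ((hskip x).mpr (by tauto))
  have hdisj2 : (pvRangeN n).countP (fun x => ((x == d) || (x == e)))
      = (pvRangeN n).countP (fun x => x == d) + (pvRangeN n).countP (fun x => x == e) := by
    apply countP_disj
    intro x _ ⟨h1, h2⟩
    simp only [beq_iff_eq] at h1 h2
    exact hde (h1 ▸ h2 ▸ rfl)
  rw [List.countP_congr (fun x hx => by rw [hsplit x hx])] at hda
  rw [hdisj1, hdisj2, hcd, hce] at hda
  omega

theorem pvStrA_eq {n : Int} {EL : List (Int × Int)} (hIn : pvInR n EL)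
    {i j k : Int} (hT : pvTri n EL i j k) :
    pvStrA n (pvBuildAM n EL) (i, j, k) = pvScore n EL i j k := by
  obtain ⟨h1, h2, h3, h4, ⟨hij, m1⟩, ⟨hjk, m2⟩, ⟨hik, m3⟩⟩ := hT
  have hget : ∀ v x : Int, 1 ≤ v → v ≤ n → 1 ≤ x → x ≤ n →
      ((pvGetAM (pvBuildAM n EL) v x ≠ 0) ↔ ((v, x) ∈ EL ∨ (x, v) ∈ EL)) := by
    intro v x hv1 hv2 hx1 hx2
    rw [getAM_build hIn ⟨hv1, hv2⟩ ⟨hx1, hx2⟩]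
    split_ifs with h <;> simp [h]
  unfold pvStrA
  rw [PySem.List.foldl_congr_mem _ _
      (fun s x => s + (if x = i ∨ x = j ∨ x = k then 0
        else ((if ((i, x) ∈ EL ∨ (x, i) ∈ EL) then (1 : Int) else 0) + (if ((j, x) ∈ EL ∨ (x, j) ∈ EL) then 1 else 0)
          + (if ((k, x) ∈ EL ∨ (x, k) ∈ EL) then 1 else 0)))) 0 ?_]
  · rw [PySem.List.foldl_add]
    have hdist : ∀ x : Int,
        (if x = i ∨ x = j ∨ x = k then (0:Int)
          else ((if ((i, x) ∈ EL ∨ (x, i) ∈ EL) then (1 : Int) else 0) + (if ((j, x) ∈ EL ∨ (x, j) ∈ EL) then 1 else 0)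
            + (if ((k, x) ∈ EL ∨ (x, k) ∈ EL) then 1 else 0)))
        = ((if x = i ∨ x = j ∨ x = k then 0 else if ((i, x) ∈ EL ∨ (x, i) ∈ EL) then (1:Int) else 0)
          + (if x = i ∨ x = j ∨ x = k then 0 else if ((j, x) ∈ EL ∨ (x, j) ∈ EL) then (1:Int) else 0))
          + (if x = i ∨ x = j ∨ x = k then 0 else if ((k, x) ∈ EL ∨ (x, k) ∈ EL) then (1:Int) else 0) := by
      intro x; by_cases h : x = i ∨ x = j ∨ x = k <;> simp [h]
    rw [List.map_congr_left (fun x _ => hdist x), PySem.List.sum_map_add_int,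
      PySem.List.sum_map_add_int]
    have mi : i ∈ pvRangeN n := PySem.List.mem_pyRange_one.mpr ⟨by omega, by omega⟩
    have mj : j ∈ pvRangeN n := PySem.List.mem_pyRange_one.mpr ⟨by omega, by omega⟩
    have mk : k ∈ pvRangeN n := PySem.List.mem_pyRange_one.mpr ⟨by omega, by omega⟩
    have m1' : ((j, i) ∈ EL ∨ (i, j) ∈ EL) := Or.symm m1
    have m2' : ((k, j) ∈ EL ∨ (j, k) ∈ EL) := Or.symm m2
    have m3' : ((k, i) ∈ EL ∨ (i, k) ∈ EL) := Or.symm m3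
    have si := sum_cV (n := n) (i := i) (j := j) (k := k) m1 m3 (by omega) hij hik mj mk
      (fun x => Iff.rfl)
    have sj := sum_cV (n := n) (i := i) (j := j) (k := k) m1' m2 (by omega) (by omega) hjk mi mk
      (fun x => ⟨fun h => h.elim (fun hi => Or.inr (Or.inl hi))
          (fun h => h.elim Or.inl (fun hk => Or.inr (Or.inr hk))),
        fun h => h.elim (fun hj => Or.inr (Or.inl hj))
          (fun h => h.elim Or.inl (fun hk => Or.inr (Or.inr hk)))⟩)
    have sk := sum_cV (n := n) (i := i) (j := j) (k := k) m3' m2' (by omega) (by omega) (by omega) mi mj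
      (fun x => ⟨fun h => h.elim (fun hi => Or.inr (Or.inl hi))
          (fun h => h.elim (fun hj => Or.inr (Or.inr hj)) (fun hk => Or.inl hk)),
        fun h => h.elim (fun hk => Or.inr (Or.inr hk))
          (fun h => h.elim Or.inl (fun hj => Or.inr (Or.inl hj)))⟩)
    simp only [pvRangeN] at si sj sk
    rw [si, sj, sk]
    unfold pvScore; omega
  · intro acc x hx
    rw [PySem.List.mem_pyRange_one] at hx
    by_cases hskip : x = i ∨ x = j ∨ x = k
    · simp [hskip]
    · simp only [if_neg hskip]
      have gi := hget i x (by omega) (by omega) (by omega) (by omega)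
      have gj := hget j x (by omega) (by omega) (by omega) (by omega)
      have gk := hget k x (by omega) (by omega) (by omega) (by omega)
      simp only [gi, gj, gk]
      split_ifs <;> ring

theorem A_isAns {n : Int} {EL : List (Int × Int)} (hPre : Pre_maxTrinityStrength n EL) :
    pvIsAns n (pvNEL n EL) (maxTrinityStrength n EL) := by
  have hIn : pvInR n (pvNEL n EL) := pvInR_NEL hPre
  rw [A_eq_fold, buildAM_norm hPre]
  apply isAns_of
  · intro t hm hp
    obtain ⟨i, j, k⟩ := t
    obtain ⟨h1, h2, h3, h4⟩ := mem_triplesA.mp hm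
    simp only at h1 h2 h3 h4
    simp only at hp
    obtain ⟨c1, c2, c3⟩ := hp
    rw [getAM_build (a := i) (b := j) hIn (by omega) (by omega)] at c1
    rw [getAM_build (a := j) (b := k) hIn (by omega) (by omega)] at c2
    rw [getAM_build (a := i) (b := k) hIn (by omega) (by omega)] at c3
    have m1 : ((i, j) ∈ pvNEL n EL ∨ (j, i) ∈ pvNEL n EL) := by by_contra hc; simp [hc] at c1
    have m2 : ((j, k) ∈ pvNEL n EL ∨ (k, j) ∈ pvNEL n EL) := by by_contra hc; simp [hc] at c2
    have m3 : ((i, k) ∈ pvNEL n EL ∨ (k, i) ∈ pvNEL n EL) := by by_contra hc; simp [hc] at c3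
    have hT : pvTri n (pvNEL n EL) i j k :=
      ⟨h1, h2, h3, h4, ⟨by omega, m1⟩, ⟨by omega, m2⟩, ⟨by omega, m3⟩⟩
    exact ⟨hT, pvStrA_eq hIn hT⟩
  · intro i j k hT
    obtain ⟨h1, h2, h3, h4, ⟨_, m1⟩, ⟨_, m2⟩, ⟨_, m3⟩⟩ := hT
    refine ⟨(i, j, k), mem_triplesA.mpr ⟨h1, h2, h3, h4⟩, ?_, ?_⟩
    · refine ⟨?_, ?_, ?_⟩ <;> simp only
      · rw [getAM_build (a := i) (b := j) hIn (by omega) (by omega)]; simp [m1]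
      · rw [getAM_build (a := j) (b := k) hIn (by omega) (by omega)]; simp [m2]
      · rw [getAM_build (a := i) (b := k) hIn (by omega) (by omega)]; simp [m3]
    · exact pvStrA_eq hIn ⟨h1, h2, h3, h4, ⟨by omega, m1⟩, ⟨by omega, m2⟩, ⟨by omega, m3⟩⟩

-- ---- B side: neighbour lists and degrees ----

def pvNbrRow (n : Int) (AM : List (List Int)) (v : Int) : List Int :=
  (PySem.List.pyRange 1 (n + 1) 1).filter (fun x => decide (pvGetAM AM v x ≠ 0 ∧ x ≠ v))

theorem pyGetD_nbr {n : Int} (AM : List (List Int)) {v : Int} (hv : 0 ≤ v ∧ v ≤ n) :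
    PySem.List.pyGetD (pvNbr n AM) v [] = pvNbrRow n AM v := by
  unfold pvNbr pvNbrRow
  rw [PySem.List.pyGetD_map_pyRange_of_nonneg _ _ _ _ hv.1 (by omega)]

theorem pyGetD_deg {n : Int} (AM : List (List Int)) {v : Int} (hv : 0 ≤ v ∧ v ≤ n) :
    PySem.List.pyGetD ((pvNbr n AM).map (fun nb => (nb.length : Int))) v 0
      = ((pvNbrRow n AM v).length : Int) := by
  unfold pvNbr pvNbrRow
  rw [List.map_map]
  rw [PySem.List.pyGetD_map_pyRange_of_nonneg _ _ _ _ hv.1 (by omega)]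
  rfl

theorem mem_nbrRow {n : Int} {EL : List (Int × Int)} (hIn : pvInR n EL)
    {v : Int} (hv : 1 ≤ v ∧ v ≤ n) (x : Int) :
    x ∈ pvNbrRow n (pvBuildAM n EL) v ↔
      1 ≤ x ∧ x ≤ n ∧ x ≠ v ∧ ((v, x) ∈ EL ∨ (x, v) ∈ EL) := by
  unfold pvNbrRow
  simp only [List.mem_filter, PySem.List.mem_pyRange_one, decide_eq_true_eq]
  constructor
  · rintro ⟨⟨hx1, hx2⟩, hne, hxv⟩
    rw [getAM_build hIn hv ⟨hx1, by omega⟩] at hne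
    refine ⟨hx1, by omega, hxv, ?_⟩
    by_contra hc
    simp [hc] at hne
  · rintro ⟨hx1, hx2, hxv, hm⟩
    refine ⟨⟨hx1, by omega⟩, ?_, hxv⟩
    rw [getAM_build hIn hv ⟨hx1, hx2⟩]
    simp [hm]

-- the degree table entry is exactly the strength-count degree pvDA
theorem nbr_len_eq_pvDA {n : Int} {EL : List (Int × Int)} (hIn : pvInR n EL)
    {v : Int} (hv : 1 ≤ v ∧ v ≤ n) :
    ((pvNbrRow n (pvBuildAM n EL) v).length : Int) = pvDA n EL v := by
  unfold pvNbrRow pvDA pvRangeN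
  congr 2
  apply List.filter_congr
  intro x hx
  rw [PySem.List.mem_pyRange_one] at hx
  rw [getAM_build hIn hv ⟨hx.1, by omega⟩]
  by_cases hc : ((v, x) ∈ EL ∨ (x, v) ∈ EL)
  · simp only [if_pos hc]
    by_cases hxv : x = v
    · subst hxv; simp
    · have hvx : ¬ v = x := fun h => hxv h.symm
      simp [hxv, hc, hvx]
  · simp only [if_neg hc]
    simp [hc]

def pvCandB (n : Int) (EL : List (Int × Int)) : List (Int × Int × Int) :=
  (PySem.List.pyRange 1 (n + 1) 1).flatMap (fun i =>
    (pvNbrRow n (pvBuildAM n EL) i).flatMap (fun j =>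
      if i < j then (pvNbrRow n (pvBuildAM n EL) j).map (fun k => (i, j, k)) else []))

set_option maxHeartbeats 1600000 in
theorem B_eq_fold (n : Int) (EL : List (Int × Int)) :
    maxTrinityStrength_alt n EL =
      (pvCandB n EL).foldl (fun ans t =>
        if t.2.1 < t.2.2 ∧ pvGetAM (pvBuildAM n EL) t.1 t.2.2 ≠ 0 then
          max ans (((pvNbrRow n (pvBuildAM n EL) t.1).length : Int) +
            ((pvNbrRow n (pvBuildAM n EL) t.2.1).length : Int) +
            ((pvNbrRow n (pvBuildAM n EL) t.2.2).length : Int) - 6)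
        else ans) (-1) := by
  unfold maxTrinityStrength_alt pvCandB
  rw [foldl_flatMap']
  apply PySem.List.foldl_congr_mem
  intro acc i hi
  rw [PySem.List.mem_pyRange_one] at hi
  rw [pyGetD_nbr (pvBuildAM n EL) ⟨by omega, by omega⟩]
  rw [foldl_flatMap']
  apply PySem.List.foldl_congr_mem
  intro acc' j hj
  by_cases hg : i < j
  · simp only [if_pos hg, List.foldl_map]
    have hjb : 1 ≤ j ∧ j ≤ n := by
      unfold pvNbrRow at hj
      simp only [List.mem_filter, PySem.List.mem_pyRange_one] at hj
      omega
    rw [pyGetD_nbr (pvBuildAM n EL) ⟨by omega, by omega⟩]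
    apply PySem.List.foldl_congr_mem
    intro acc'' k hk
    have hkb : 1 ≤ k ∧ k ≤ n := by
      unfold pvNbrRow at hk
      simp only [List.mem_filter, PySem.List.mem_pyRange_one] at hk
      omega
    by_cases hp : j < k ∧ pvGetAM (pvBuildAM n EL) i k ≠ 0
    · rw [if_pos hp, if_pos hp]
      rw [pyGetD_deg (pvBuildAM n EL) ⟨by omega, by omega⟩,
        pyGetD_deg (pvBuildAM n EL) ⟨by omega, by omega⟩,
        pyGetD_deg (pvBuildAM n EL) ⟨by omega, by omega⟩]
    · rw [if_neg hp, if_neg hp]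
  · simp only [if_neg hg, List.foldl_nil]

set_option maxHeartbeats 1600000 in
theorem B_isAns {n : Int} {EL : List (Int × Int)} (hPre : Pre_maxTrinityStrength n EL) :
    pvIsAns n (pvNEL n EL) (maxTrinityStrength_alt n EL) := by
  have hIn : pvInR n (pvNEL n EL) := pvInR_NEL hPre
  rw [B_eq_fold, buildAM_norm hPre]
  apply isAns_of (pvCandB n EL)
    (p := fun t => t.2.1 < t.2.2 ∧ pvGetAM (pvBuildAM n (pvNEL n EL)) t.1 t.2.2 ≠ 0)
    (f := fun t => ((pvNbrRow n (pvBuildAM n (pvNEL n EL)) t.1).length : Int) +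
      ((pvNbrRow n (pvBuildAM n (pvNEL n EL)) t.2.1).length : Int) +
      ((pvNbrRow n (pvBuildAM n (pvNEL n EL)) t.2.2).length : Int) - 6)
  · intro t hm hp
    simp only [pvCandB, List.mem_flatMap] at hm
    rw [buildAM_norm hPre] at hm
    obtain ⟨i, hi, j, hj, hmem⟩ := hm
    rw [PySem.List.mem_pyRange_one] at hi
    by_cases hg : i < j
    · rw [if_pos hg, List.mem_map] at hmem
      obtain ⟨k, hk, rfl⟩ := hmem
      rw [mem_nbrRow hIn ⟨by omega, by omega⟩] at hj
      obtain ⟨hj1, hj2, hjne, hjm⟩ := hj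
      rw [mem_nbrRow hIn ⟨hj1, hj2⟩] at hk
      obtain ⟨hk1, hk2, hkne, hkm⟩ := hk
      simp only at hp ⊢
      obtain ⟨hjk, hik0⟩ := hp
      rw [getAM_build hIn ⟨by omega, by omega⟩ ⟨hk1, hk2⟩] at hik0
      have hikm : ((i, k) ∈ pvNEL n EL ∨ (k, i) ∈ pvNEL n EL) := by
        by_contra hc; simp [hc] at hik0
      have hT : pvTri n (pvNEL n EL) i j k :=
        ⟨by omega, hg, hjk, hk2, ⟨by omega, hjm⟩, ⟨by omega, hkm⟩, ⟨by omega, hikm⟩⟩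
      refine ⟨hT, ?_⟩
      rw [nbr_len_eq_pvDA hIn ⟨by omega, by omega⟩, nbr_len_eq_pvDA hIn ⟨hj1, hj2⟩,
        nbr_len_eq_pvDA hIn ⟨hk1, hk2⟩]
      rfl
    · rw [if_neg hg] at hmem
      cases hmem
  · intro i j k hT
    obtain ⟨h1, h2, h3, h4, ⟨hij, mij⟩, ⟨hjk, mjk⟩, ⟨hik, mik⟩⟩ := hT
    refine ⟨(i, j, k), ?_, ?_, ?_⟩
    · simp only [pvCandB, List.mem_flatMap]
      rw [buildAM_norm hPre]
      refine ⟨i, PySem.List.mem_pyRange_one.mpr ⟨by omega, by omega⟩, j, ?_, ?_⟩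
      · rw [mem_nbrRow hIn ⟨by omega, by omega⟩]
        exact ⟨by omega, by omega, fun h => hij h.symm, mij⟩
      · rw [if_pos h2, List.mem_map]
        refine ⟨k, ?_, rfl⟩
        rw [mem_nbrRow hIn ⟨by omega, by omega⟩]
        exact ⟨by omega, by omega, fun h => hjk h.symm, mjk⟩
    · refine ⟨h3, ?_⟩
      show pvGetAM (pvBuildAM n (pvNEL n EL)) i k ≠ 0
      rw [getAM_build hIn ⟨by omega, by omega⟩ ⟨by omega, by omega⟩]
      simp [mik]
    · simp only
      rw [nbr_len_eq_pvDA hIn ⟨by omega, by omega⟩, nbr_len_eq_pvDA hIn ⟨by omega, by omega⟩,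
        nbr_len_eq_pvDA hIn ⟨by omega, by omega⟩]
      rfl

-- ===== VERDICT (by name: the statement is the Claim_ definition above) =====
theorem maxTrinityStrength_spec : Claim_equal_maxTrinityStrength := by
  intro n EL _ hPre
  unfold Spec_maxTrinityStrength
  exact pvIsAns_unique (A_isAns hPre) (B_isAns hPre)
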